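-- pv_equiv track=rewrite | github.com/practual/advent_of_code_2021 | day23/day23.py | get_distance_room_to_corridor
-- ===== SOURCE A (Python) =====
-- room_junctions = ['c2', 'c4', 'c6', 'c8']
--
-- def get_distance_room_to_corridor(burrow, start, ignore_blockage):
--     distance = 0
--     room_number = int(start[1])
--     room_slot = int(start[2])
--     for slot in range(room_slot - 1, -1, -1):
--         if not ignore_blockage and burrow['r' + str(room_number) + str(slot)] != '':
--             return 0
--         distance += 1
--     if not ignore_blockage and burrow[room_junctions[room_number]] != '':
--         return 0
--     distance += 1
--     return distance
-- ===== SOURCE B (Python) =====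
-- room_junctions = ['c2', 'c4', 'c6', 'c8']
--
-- def _climb(burrow, room_number, slot, ignore_blockage):
--     # distance from room slot `slot` up and out to the corridor, 0 if blocked
--     if slot < 0:
--         if not ignore_blockage and burrow[room_junctions[room_number]] != '':
--             return 0
--         return 1
--     if not ignore_blockage and burrow['r' + str(room_number) + str(slot)] != '':
--         return 0
--     below = _climb(burrow, room_number, slot - 1, ignore_blockage)
--     return below + 1 if below else 0
--
-- def get_distance_room_to_corridor(burrow, start, ignore_blockage):
--     return _climb(burrow, int(start[1]), int(start[2]) - 1, ignore_blockage)
-- ===== Notes on version B (the rewrite author's own statement) =====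
-- stated objective: alternative
-- what changed: Replaces the iterative accumulator loop with a structural recursion on the slot: each frame checks its own cell, the junction check becomes the base case, and the distance is rebuilt on the way back out with 0 propagated as a blocked marker (same keys touched in the same order).
import Mathlib
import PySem

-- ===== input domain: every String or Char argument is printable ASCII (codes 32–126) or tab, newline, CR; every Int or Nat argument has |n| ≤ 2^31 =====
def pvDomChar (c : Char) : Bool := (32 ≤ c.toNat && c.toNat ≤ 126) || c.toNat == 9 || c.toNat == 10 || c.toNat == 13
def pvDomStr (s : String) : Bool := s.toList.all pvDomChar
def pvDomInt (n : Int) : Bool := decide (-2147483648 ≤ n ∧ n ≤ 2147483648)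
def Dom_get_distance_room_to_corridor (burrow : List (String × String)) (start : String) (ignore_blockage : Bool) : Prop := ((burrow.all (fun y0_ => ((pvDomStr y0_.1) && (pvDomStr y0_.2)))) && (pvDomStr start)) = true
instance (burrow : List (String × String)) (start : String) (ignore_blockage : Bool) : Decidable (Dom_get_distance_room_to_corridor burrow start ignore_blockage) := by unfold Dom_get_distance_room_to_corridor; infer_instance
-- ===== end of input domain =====

-- B replaces A's iterative accumulator loop with a structural recursion on the slot: each frame
-- checks its own cell, the junction check is the base case, and the distance is rebuilt on the
-- way back out with 0 propagated as a blocked marker; the same keys are touched in the same order.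
-- (Each port and the precondition carry their own copies of the module constant room_junctions,
-- of int(start[i]), of the key string 'r'+str(rn)+str(slot) and of the burrow lookup.)

-- ===== PORT A =====
def pvJunctionsA : List String := ["c2", "c4", "c6", "c8"]

-- int(start[i]): none = IndexError or ValueError
def pvIntAtA (start : String) (i : Int) : Option Int :=
  (PySem.Str.pyGet? start i).bind (fun c => PySem.Int.ofChars? [c])

def pvKeyA (rn slot : Int) : String := "r" ++ PySem.Int.toStr rn ++ PySem.Int.toStr slot

-- burrow[k]; total via default "" — exact under Pre_, which guarantees every touched key is present
def pvValA (burrow : List (String × String)) (k : String) : String :=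
  (PySem.Dict.mk burrow).getD k ""

-- the for-loop of A: accumulates distance, returns none on the early 'return 0'
def pvDistLoop (burrow : List (String × String)) (rn : Int) (ib : Bool) :
    List Int → Int → Option Int
  | [], distance => some distance
  | slot :: rest, distance =>
    if ib = false ∧ pvValA burrow (pvKeyA rn slot) ≠ "" then none
    else pvDistLoop burrow rn ib rest (distance + 1)

def get_distance_room_to_corridor (burrow : List (String × String)) (start : String) (ignore_blockage : Bool) : Int :=
  match pvIntAtA start 1, pvIntAtA start 2 with
  | some room_number, some room_slot =>
    match pvDistLoop burrow room_number ignore_blockage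
        (PySem.List.pyRange (room_slot - 1) (-1) (-1)) 0 with
    | none => 0
    | some distance =>
      if ignore_blockage = false ∧
          pvValA burrow (PySem.List.pyGetD pvJunctionsA room_number "") ≠ "" then 0
      else distance + 1
  | _, _ => 0  -- ValueError/IndexError on int(start[1])/int(start[2]): excluded by Pre_

-- ===== PORT B =====
def pvJunctionsB : List String := ["c2", "c4", "c6", "c8"]

def pvIntAtB (start : String) (i : Int) : Option Int :=
  (PySem.Str.pyGet? start i).bind (fun c => PySem.Int.ofChars? [c])

def pvKeyB (rn slot : Int) : String := "r" ++ PySem.Int.toStr rn ++ PySem.Int.toStr slot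

def pvValB (burrow : List (String × String)) (k : String) : String :=
  (PySem.Dict.mk burrow).getD k ""

-- Source B's _climb: recursion on the slot; base case is the junction check, 0 marks 'blocked'
def pvClimb (burrow : List (String × String)) (rn : Int) (slot : Int) (ib : Bool) : Int :=
  if slot < 0 then
    if ib = false ∧ pvValB burrow (PySem.List.pyGetD pvJunctionsB rn "") ≠ "" then 0
    else 1
  else if ib = false ∧ pvValB burrow (pvKeyB rn slot) ≠ "" then 0
  else
    let below := pvClimb burrow rn (slot - 1) ib
    if below ≠ 0 then below + 1 else 0
termination_by (slot + 1).toNat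
decreasing_by omega

def get_distance_room_to_corridor_alt (burrow : List (String × String)) (start : String) (ignore_blockage : Bool) : Int :=
  match pvIntAtB start 1 with
  | none => 0  -- ValueError/IndexError on int(start[1]): excluded by Pre_
  | some room_number =>
    match pvIntAtB start 2 with
    | none => 0  -- ValueError/IndexError on int(start[2]): excluded by Pre_
    | some room_slot => pvClimb burrow room_number (room_slot - 1) ignore_blockage

-- ===== PRECONDITION & SPEC =====
-- Pre_ = exactly the inputs where the Python A returns: int(start[1]) and int(start[2]) parse, and
-- (when blockage is checked) every key the scan reaches before its first occupied slot is present,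
-- and if no slot is occupied the junction index is in range and the junction key is present.
-- (0 ≤ rs is automatic for a one-character parse; it is stated so the proof can use it, it excludes nothing.)
def pvJunctionsP : List String := ["c2", "c4", "c6", "c8"]

def pvIntAtP (start : String) (i : Int) : Option Int :=
  (PySem.Str.pyGet? start i).bind (fun c => PySem.Int.ofChars? [c])

def pvKeyP (rn slot : Int) : String := "r" ++ PySem.Int.toStr rn ++ PySem.Int.toStr slot

def pvPreB (burrow : List (String × String)) (start : String) (ib : Bool) : Bool :=
  match pvIntAtP start 1 with
  | none => false
  | some rn =>
    match pvIntAtP start 2 with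
    | none => false
    | some rs =>
    decide (0 ≤ rs) &&
    (ib ||
      ((List.range (PySem.List.pyRange (rs - 1) (-1) (-1)).length).all (fun i =>
        !(((PySem.List.pyRange (rs - 1) (-1) (-1)).take i).all
            (fun s => (PySem.Dict.mk burrow).get? (pvKeyP rn s) == some "")) ||
        ((PySem.Dict.mk burrow).get? (pvKeyP rn ((PySem.List.pyRange (rs - 1) (-1) (-1)).getD i 0))).isSome) &&
      (!((PySem.List.pyRange (rs - 1) (-1) (-1)).all
            (fun s => (PySem.Dict.mk burrow).get? (pvKeyP rn s) == some "")) ||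
        (decide (0 ≤ rn) && decide (rn < 4) &&
          ((PySem.Dict.mk burrow).get? (PySem.List.pyGetD pvJunctionsP rn "")).isSome))))

def Pre_get_distance_room_to_corridor (burrow : List (String × String)) (start : String) (ignore_blockage : Bool) : Prop :=
  pvPreB burrow start ignore_blockage = true
instance (burrow : List (String × String)) (start : String) (ignore_blockage : Bool) : Decidable (Pre_get_distance_room_to_corridor burrow start ignore_blockage) := by unfold Pre_get_distance_room_to_corridor; infer_instance

def pvWitness_get_distance_room_to_corridor : (List (String × String)) × String × Bool :=
  ([("r10", ""), ("c4", "")], "r11", false)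

def Spec_get_distance_room_to_corridor (burrow : List (String × String)) (start : String) (ignore_blockage : Bool) (out : Int) : Prop := out = get_distance_room_to_corridor_alt burrow start ignore_blockage
instance (burrow : List (String × String)) (start : String) (ignore_blockage : Bool) (out : Int) : Decidable (Spec_get_distance_room_to_corridor burrow start ignore_blockage out) := by unfold Spec_get_distance_room_to_corridor; infer_instance

-- ===== CLAIM (what is proved, stated in full; the proofs are below) =====
def Claim_equal_get_distance_room_to_corridor : Prop := ∀ (burrow : List (String × String)) (start : String) (ignore_blockage : Bool), Dom_get_distance_room_to_corridor burrow start ignore_blockage → Pre_get_distance_room_to_corridor burrow start ignore_blockage → Spec_get_distance_room_to_corridor burrow start ignore_blockage (get_distance_room_to_corridor burrow start ignore_blockage)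

-- ===== LEMMAS AND PROOFS =====
-- 'is some lower slot occupied?' — a scan over a countdown list, shared spec of both sides
def pvBlocked (burrow : List (String × String)) (rn : Int) : List Int → Bool
  | [] => false
  | slot :: rest =>
    if pvValA burrow (pvKeyA rn slot) ≠ "" then true else pvBlocked burrow rn rest

-- A's loop returns none exactly when the scan finds a blockage (ib = false), else distance + length
theorem pvDistLoop_eq (burrow : List (String × String)) (rn : Int) (ib : Bool)
    (slots : List Int) (d : Int) :
    pvDistLoop burrow rn ib slots d =
      if ib = false ∧ pvBlocked burrow rn slots = true then none
      else some (d + slots.length) := by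
  induction slots generalizing d with
  | nil => simp [pvDistLoop, pvBlocked]
  | cons slot rest ih =>
    simp only [pvDistLoop, pvBlocked]
    by_cases hb : pvValA burrow (pvKeyA rn slot) = ""
    · cases ib <;> simp [hb, ih] <;> try rw [show d + 1 + (rest.length : Int) = d + (rest.length + 1) from by omega]
    · cases ib <;> simp [hb, ih] <;> try rw [show d + 1 + (rest.length : Int) = d + (rest.length + 1) from by omega]

-- B's recursion returns 0 exactly when a slot or the junction is occupied (ib = false), else slot + 2
theorem pvClimb_eq (burrow : List (String × String)) (rn : Int) (ib : Bool)
    (slot : Int) (hge : -1 ≤ slot) :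
    pvClimb burrow rn slot ib =
      if ib = false ∧
          (pvBlocked burrow rn (PySem.List.pyRange slot (-1) (-1)) = true ∨
           pvValA burrow (PySem.List.pyGetD pvJunctionsA rn "") ≠ "") then 0
      else slot + 2 := by
  rw [pvClimb]
  by_cases hneg : slot < 0
  · have h1 : slot = -1 := by omega
    subst h1
    rw [PySem.List.pyRange_neg_one_eq_nil (by omega)]
    simp only [pvBlocked]
    cases ib <;> simp [show pvValB = pvValA from rfl, show pvJunctionsB = pvJunctionsA from rfl]
  · have ih := pvClimb_eq burrow rn ib (slot - 1) (by omega)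
    rw [PySem.List.pyRange_neg_one_cons (by omega)]
    simp only [pvBlocked, show pvValB = pvValA from rfl, show pvKeyB = pvKeyA from rfl,
      show pvJunctionsB = pvJunctionsA from rfl, if_neg hneg]
    by_cases hocc : ib = false ∧ pvValA burrow (pvKeyA rn slot) ≠ ""
    · simp [hocc.1, hocc.2]
    · rw [if_neg hocc, ih]
      by_cases hib : ib = false
      · by_cases hblk : pvBlocked burrow rn (PySem.List.pyRange (slot - 1) (-1) (-1)) = true ∨
            pvValA burrow (PySem.List.pyGetD pvJunctionsA rn "") ≠ ""
        · have hocc' : ¬ pvValA burrow (pvKeyA rn slot) ≠ "" := by tauto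
          simp [hib, hblk, hocc']
        · push Not at hblk
          have hv : pvValA burrow (pvKeyA rn slot) = "" := by
            by_contra h; exact hocc ⟨hib, h⟩
          simp [hib, hblk.1, hblk.2, hv]
          split_ifs <;> omega
      · have hib' : ib = true := by cases ib <;> simp_all
        simp [hib']
        split_ifs <;> omega
termination_by (slot + 1).toNat
decreasing_by omega

theorem get_distance_room_to_corridor_spec : Claim_equal_get_distance_room_to_corridor := by
  intro burrow start ib _hDom hPre
  unfold Pre_get_distance_room_to_corridor pvPreB at hPre
  unfold Spec_get_distance_room_to_corridor
  unfold get_distance_room_to_corridor get_distance_room_to_corridor_alt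
  rw [show pvIntAtB = pvIntAtA from rfl] at *
  rw [show pvIntAtP = pvIntAtA from rfl] at hPre
  cases h1 : pvIntAtA start 1 with
  | none => simp [h1] at hPre
  | some rn =>
    cases h2 : pvIntAtA start 2 with
    | none => simp [h1, h2] at hPre
    | some rs =>
      simp only [h1, h2, Bool.and_eq_true, decide_eq_true_eq] at hPre ⊢
      have hrs : 0 ≤ rs := hPre.1
      have hlen : ((PySem.List.pyRange (rs - 1) (-1) (-1)).length : Int) = rs := by
        rw [PySem.List.length_pyRange_neg_one]
        omega
      rw [pvDistLoop_eq, pvClimb_eq burrow rn ib (rs - 1) (by omega)]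
      cases ib with
      | true => simp; omega
      | false =>
        by_cases hb : pvBlocked burrow rn (PySem.List.pyRange (rs - 1) (-1) (-1)) = true
        · simp [hb]
        · by_cases hj : pvValA burrow (PySem.List.pyGetD pvJunctionsA rn "") ≠ ""
          · simp [hb, hj]
          · simp [hb, hj]
            omega
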